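-- pv_equiv track=rewrite | github.com/super1207/satoricq | qq_adapter.py | _qqmsg_to_arr
-- ===== SOURCE A (Python) =====
-- def _qqmsg_to_arr(cqstr) -> list:
--     text = ""
--     jsonarr = []
--     stat = 0
--     i = 0
--     while i < len(cqstr):
--         cur_ch = cqstr[i]
--         if stat == 0:
--             if cur_ch == '<':
--                 stat = 1
--                 jsonarr.append({
--                     "type":"text",
--                     "data":text
--                 })
--                 text = ""
--                 text += cur_ch
--                 i += 1
--             elif cur_ch == "&":
--                 if cqstr[i:i+4] == "&gt;":
--                     text += ">"
--                     i += 4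
--                 elif cqstr[i:i+4] == "&lt;":
--                     text += "<"
--                     i += 4
--                 elif cqstr[i:i+5] == "&amp;":
--                     text += "&"
--                     i += 5
--                 else:
--                     text += "&"
--                     i += 1
--             else:
--                 text += cur_ch
--                 i += 1
--         else:
--             if cur_ch == '>':
--                 stat = 0
--                 text += ">"
--                 jsonarr.append({
--                     "type":"embbed",
--                     "data":text
--                 })
--                 text = ""
--                 i += 1
--             else:
--                 i += 1
--                 text += cur_ch
--
--     if text != "":
--         jsonarr.append({
--             "type":"text",
--             "data":text
--         })
--     return jsonarr
-- ===== SOURCE B (Python) =====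
-- def _decode(s):
--     # &amp; last so the '&' it produces is never re-scanned (matches A's left-to-right pass)
--     return s.replace("&gt;", ">").replace("&lt;", "<").replace("&amp;", "&")
--
-- def _qqmsg_to_arr(cqstr) -> list:
--     out = []
--     rest = cqstr
--     while True:
--         lt = rest.find('<')
--         if lt < 0:
--             if rest:
--                 out.append({"type": "text", "data": _decode(rest)})
--             return out
--         out.append({"type": "text", "data": _decode(rest[:lt])})
--         rest = rest[lt:]
--         gt = rest.find('>')
--         if gt < 0:
--             out.append({"type": "text", "data": rest})
--             return out
--         out.append({"type": "embbed", "data": rest[:gt + 1]})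
--         rest = rest[gt + 1:]
-- ===== Notes on version B (the rewrite author's own statement) =====
-- stated objective: faster
-- what changed: Replaces A's per-character two-state machine (index arithmetic, manual entity matching, leftover-text bookkeeping) with a boundary scan that locates each tag opener and closer via str.find, slices the string into text and tag segments, and entity-decodes text segments with three chained str.replace calls (ampersand entity last).
import Mathlib
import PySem

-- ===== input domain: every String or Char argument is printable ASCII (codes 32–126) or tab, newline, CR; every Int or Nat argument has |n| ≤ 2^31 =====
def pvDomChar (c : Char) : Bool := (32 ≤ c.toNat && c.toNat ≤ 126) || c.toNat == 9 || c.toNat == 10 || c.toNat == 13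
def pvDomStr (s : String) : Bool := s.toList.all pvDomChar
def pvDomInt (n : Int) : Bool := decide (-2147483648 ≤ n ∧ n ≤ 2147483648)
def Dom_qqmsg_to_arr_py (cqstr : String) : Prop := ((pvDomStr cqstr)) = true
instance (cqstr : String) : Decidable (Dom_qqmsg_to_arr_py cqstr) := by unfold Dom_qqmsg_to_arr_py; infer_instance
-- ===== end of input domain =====

-- B replaces A's per-character two-state machine by a boundary scan (str.find for tag openers
-- and closers, slicing out whole segments) with an entity decoder of three chained replaces;
-- same return value; measured much faster (C-level scanning instead of a Python char loop).

-- ===== PORT A =====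
-- A's while-loop over index i, carried as the remaining suffix `rest` (= cqstr[i:]):
-- `stat`, `text` and the accumulator `jsonarr` are A's loop variables; Python's
-- slices cqstr[i:i+4] / cqstr[i:i+5] (i always in range here) become rest.take 4 / rest.take 5.
def qqA (rest : List Char) (stat : Nat) (text : List Char)
    (jsonarr : List (List (String × String))) : List (List (String × String)) :=
  match rest with
  | [] => if text ≠ [] then jsonarr ++ [[("type", "text"), ("data", String.ofList text)]] else jsonarr
  | c :: r =>
    if stat = 0 then
      if c = '<' then
        qqA r 1 [c] (jsonarr ++ [[("type", "text"), ("data", String.ofList text)]])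
      else if c = '&' then
        if (c :: r).take 4 = "&gt;".toList then qqA ((c :: r).drop 4) 0 (text ++ ['>']) jsonarr
        else if (c :: r).take 4 = "&lt;".toList then qqA ((c :: r).drop 4) 0 (text ++ ['<']) jsonarr
        else if (c :: r).take 5 = "&amp;".toList then qqA ((c :: r).drop 5) 0 (text ++ ['&']) jsonarr
        else qqA r 0 (text ++ ['&']) jsonarr
      else qqA r 0 (text ++ [c]) jsonarr
    else
      if c = '>' then
        qqA r 0 [] (jsonarr ++ [[("type", "embbed"), ("data", String.ofList (text ++ ['>']))]])
      else qqA r 1 (text ++ [c]) jsonarr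
termination_by rest.length
decreasing_by all_goals (first | (simp; omega) | simp)

def qqmsg_to_arr_py (cqstr : String) : List (List (String × String)) :=
  qqA cqstr.toList 0 [] []

-- ===== PORT B =====
-- Source B's _decode: s.replace("&gt;",">").replace("&lt;","<").replace("&amp;","&"), on the list side
def qqDecodeB (s : List Char) : List Char :=
  PySem.Chars.replace (PySem.Chars.replace (PySem.Chars.replace s "&gt;".toList ">".toList)
    "&lt;".toList "<".toList) "&amp;".toList "&".toList

-- Source B's while-loop: `rest` is the unprocessed suffix; rest.find('<') / rest.find('>')
-- are PySem.Chars.find; slices are take/drop (the indices are the nonnegative find results).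
def qqB (rest : List Char) (out : List (List (String × String))) : List (List (String × String)) :=
  let lt := PySem.Chars.find rest ['<']
  if _hlt : lt < 0 then
    if rest ≠ [] then out ++ [[("type", "text"), ("data", String.ofList (qqDecodeB rest))]] else out
  else
    let out' := out ++ [[("type", "text"), ("data", String.ofList (qqDecodeB (rest.take lt.toNat)))]]
    let rest' := rest.drop lt.toNat
    let gt := PySem.Chars.find rest' ['>']
    if gt < 0 then out' ++ [[("type", "text"), ("data", String.ofList rest')]]
    else qqB (rest'.drop (gt.toNat + 1)) (out' ++ [[("type", "embbed"), ("data", String.ofList (rest'.take (gt.toNat + 1)))]])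
termination_by rest.length
decreasing_by
  have h1 : ['<'] <:+: rest := (PySem.Chars.find_nonneg_iff rest ['<']).mp (by omega)
  have h2 : 1 ≤ rest.length := h1.sublist.length_le
  simp; omega

def qqmsg_to_arr_py_alt (cqstr : String) : List (List (String × String)) :=
  qqB cqstr.toList []

-- ===== PRECONDITION & SPEC =====
def Spec_qqmsg_to_arr_py (cqstr : String) (out : List (List (String × String))) : Prop := out = qqmsg_to_arr_py_alt cqstr
instance (cqstr : String) (out : List (List (String × String))) : Decidable (Spec_qqmsg_to_arr_py cqstr out) := by unfold Spec_qqmsg_to_arr_py; infer_instance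

-- ===== CLAIM (what is proved, stated in full; the proofs are below) =====
def Claim_equal_qqmsg_to_arr_py : Prop := ∀ (cqstr : String), Dom_qqmsg_to_arr_py cqstr → Spec_qqmsg_to_arr_py cqstr (qqmsg_to_arr_py cqstr)

-- ===== LEMMAS AND PROOFS =====

-- segment builders (proof shorthand for the dict literals of both ports)
def tseg (t : List Char) : List (String × String) := [("type", "text"), ("data", String.ofList t)]
def eseg (t : List Char) : List (String × String) := [("type", "embbed"), ("data", String.ofList t)]

-- clean recursion computing PySem.Chars.replace for a nonempty pattern o::os and 1-char replacement
def rep (o : Char) (os : List Char) (nw : Char) (l : List Char) : List Char :=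
  match l with
  | [] => []
  | c :: t =>
    if (o :: os).isPrefixOf (c :: t) then nw :: rep o os nw (t.drop os.length)
    else c :: rep o os nw t
termination_by l.length
decreasing_by all_goals (first | (simp; omega) | simp)

-- the one-pass decoder that A's stat-0 scanning performs on text between tags
def dec1 : List Char → List Char
  | [] => []
  | c :: r =>
    if c = '&' then
      if (c :: r).take 4 = "&gt;".toList then '>' :: dec1 ((c :: r).drop 4)
      else if (c :: r).take 4 = "&lt;".toList then '<' :: dec1 ((c :: r).drop 4)
      else if (c :: r).take 5 = "&amp;".toList then '&' :: dec1 ((c :: r).drop 5)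
      else '&' :: dec1 r
    else c :: dec1 r
termination_by l => l.length
decreasing_by all_goals (first | (simp; omega) | simp)

lemma go_eq_rep (o : Char) (os : List Char) (nw : Char) :
    ∀ (fuel : Nat) (l acc : List Char), l.length ≤ fuel →
      PySem.Chars.replace.go (o :: os) [nw] fuel l acc = acc.reverse ++ rep o os nw l := by
  intro fuel
  induction fuel with
  | zero =>
    intro l acc h
    have hl : l = [] := by cases l <;> simp_all
    subst hl
    rw [PySem.Chars.replace.go]
    simp [rep]
  | succ n ih =>
    intro l acc h
    cases l with
    | nil => rw [PySem.Chars.replace.go] <;> simp [rep]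
    | cons c t =>
      rw [PySem.Chars.replace.go, rep]
      by_cases hp : (o :: os).isPrefixOf (c :: t)
      · simp only [hp, if_true]
        have hd : List.drop (o :: os).length (c :: t) = t.drop os.length := by simp
        rw [hd, ih (t.drop os.length) ([nw].reverse ++ acc) (by simp at h ⊢; omega)]
        simp
      · simp only [hp, if_false, Bool.false_eq_true]
        rw [ih t (c :: acc) (by simp at h; omega)]
        simp

lemma replace_eq_rep (o : Char) (os : List Char) (nw : Char) (l : List Char) :
    PySem.Chars.replace l (o :: os) [nw] = rep o os nw l := by
  rw [PySem.Chars.replace]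
  simp [go_eq_rep o os nw l.length l [] le_rfl]

lemma rep_prefix (o : Char) (os : List Char) (nw : Char) :
    ∀ (w t : List Char), nw ∉ w → w <+: rep o os nw t → w <+: t := by
  intro w
  induction w with
  | nil => intro t _ _; exact List.nil_prefix
  | cons d w' ih =>
    intro t hnw hp
    cases t with
    | nil => rw [rep] at hp; exact absurd hp (by simp)
    | cons c t' =>
      rw [rep] at hp
      by_cases hpre : (o :: os).isPrefixOf (c :: t')
      · simp only [hpre, if_true] at hp
        have : d = nw := (List.cons_prefix_cons.mp hp).1
        exact absurd (this ▸ List.mem_cons_self) hnw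
      · simp only [hpre, if_false, Bool.false_eq_true] at hp
        obtain ⟨hd, hp'⟩ := List.cons_prefix_cons.mp hp
        exact hd ▸ List.cons_prefix_cons.mpr ⟨rfl, ih t' (fun hm => hnw (List.mem_cons_of_mem d hm)) hp'⟩


lemma rep_step_yes (o : Char) (os : List Char) (nw c : Char) (t : List Char)
    (h : (o :: os).isPrefixOf (c :: t) = true) :
    rep o os nw (c :: t) = nw :: rep o os nw (t.drop os.length) := by
  rw [rep]; simp [h]

lemma rep_step_no (o : Char) (os : List Char) (nw c : Char) (t : List Char)
    (h : ¬ (o :: os).isPrefixOf (c :: t) = true) :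
    rep o os nw (c :: t) = c :: rep o os nw t := by
  rw [rep]; simp [h]


lemma hgt_toList : "&gt;".toList = ['&','g','t',';'] := rfl
lemma hlt_toList : "&lt;".toList = ['&','l','t',';'] := rfl
lemma hamp_toList : "&amp;".toList = ['&','a','m','p',';'] := rfl

lemma dec1_gt (m : List Char) : dec1 ('&'::'g'::'t'::';'::m) = '>' :: dec1 m := by
  rw [dec1]; simp [hgt_toList]

lemma dec1_lt (m : List Char) : dec1 ('&'::'l'::'t'::';'::m) = '<' :: dec1 m := by
  rw [dec1]; simp [hgt_toList, hlt_toList]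

lemma dec1_amp (m : List Char) : dec1 ('&'::'a'::'m'::'p'::';'::m) = '&' :: dec1 m := by
  rw [dec1]; simp [hgt_toList, hlt_toList, hamp_toList]

lemma dec1_amb (t : List Char) (h1 : ¬ ('&' :: t).take 4 = "&gt;".toList)
    (h2 : ¬ ('&' :: t).take 4 = "&lt;".toList) (h3 : ¬ ('&' :: t).take 5 = "&amp;".toList) :
    dec1 ('&' :: t) = '&' :: dec1 t := by
  simp only [hgt_toList, hlt_toList, hamp_toList, List.take_succ_cons, List.cons.injEq,
    true_and] at h1 h2 h3
  rw [dec1]; simp [h1, h2, h3]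

lemma dec1_ch (c : Char) (t : List Char) (h : ¬ c = '&') : dec1 (c :: t) = c :: dec1 t := by
  rw [dec1]; simp [h]

lemma dec1_gt' (l : List Char) (h : l.take 4 = "&gt;".toList) : dec1 l = '>' :: dec1 (l.drop 4) := by
  have hl : l = '&'::'g'::'t'::';'::(l.drop 4) := by
    conv_lhs => rw [← List.take_append_drop 4 l]
    rw [h]; rfl
  conv_lhs => rw [hl]
  exact dec1_gt _

lemma dec1_lt' (l : List Char) (h : l.take 4 = "&lt;".toList) : dec1 l = '<' :: dec1 (l.drop 4) := by
  have hl : l = '&'::'l'::'t'::';'::(l.drop 4) := by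
    conv_lhs => rw [← List.take_append_drop 4 l]
    rw [h]; rfl
  conv_lhs => rw [hl]
  exact dec1_lt _

lemma dec1_amp' (l : List Char) (h : l.take 5 = "&amp;".toList) : dec1 l = '&' :: dec1 (l.drop 5) := by
  have hl : l = '&'::'a'::'m'::'p'::';'::(l.drop 5) := by
    conv_lhs => rw [← List.take_append_drop 5 l]
    rw [h]; rfl
  conv_lhs => rw [hl]
  exact dec1_amp _

lemma dec_eq_aux : ∀ (n : Nat) (l : List Char), l.length ≤ n →
    rep '&' ['a','m','p',';'] '&' (rep '&' ['l','t',';'] '<' (rep '&' ['g','t',';'] '>' l)) = dec1 l := by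
  intro n
  induction n with
  | zero =>
    intro l h
    have : l = [] := by cases l <;> simp_all
    subst this; rw [rep, rep, rep, dec1]
  | succ n ih =>
    intro l h
    cases l with
    | nil => rw [rep, rep, rep, dec1]
    | cons c t =>
      by_cases h1 : (c :: t).take 4 = "&gt;".toList
      · obtain ⟨m, hm, hl⟩ : ∃ m, m.length ≤ n ∧ c :: t = '&'::'g'::'t'::';'::m := by
          refine ⟨(c :: t).drop 4, by simp only [List.length_drop, List.length_cons] at *; omega, ?_⟩
          conv_lhs => rw [← List.take_append_drop 4 (c :: t)]
          rw [h1]; rfl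
        rw [hl]
        rw [rep_step_yes '&' ['g','t',';'] '>' '&' ('g'::'t'::';'::m) (by simp [List.isPrefixOf])]
        rw [show List.drop (['g','t',';'] : List Char).length ('g'::'t'::';'::m) = m from rfl]
        rw [rep_step_no '&' ['l','t',';'] '<' '>' _ (by simp [List.isPrefixOf])]
        rw [rep_step_no '&' ['a','m','p',';'] '&' '>' _ (by simp [List.isPrefixOf])]
        rw [dec1_gt, ih m hm]
      · by_cases h2 : (c :: t).take 4 = "&lt;".toList
        · obtain ⟨m, hm, hl⟩ : ∃ m, m.length ≤ n ∧ c :: t = '&'::'l'::'t'::';'::m := by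
            refine ⟨(c :: t).drop 4, by simp only [List.length_drop, List.length_cons] at *; omega, ?_⟩
            conv_lhs => rw [← List.take_append_drop 4 (c :: t)]
            rw [h2]; rfl
          rw [hl]
          rw [rep_step_no '&' ['g','t',';'] '>' '&' ('l'::'t'::';'::m) (by simp [List.isPrefixOf])]
          rw [rep_step_no '&' ['g','t',';'] '>' 'l' ('t'::';'::m) (by simp [List.isPrefixOf])]
          rw [rep_step_no '&' ['g','t',';'] '>' 't' (';'::m) (by simp [List.isPrefixOf])]
          rw [rep_step_no '&' ['g','t',';'] '>' ';' m (by simp [List.isPrefixOf])]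
          rw [rep_step_yes '&' ['l','t',';'] '<' '&'
            ('l'::'t'::';'::(rep '&' ['g','t',';'] '>' m)) (by simp [List.isPrefixOf])]
          rw [show List.drop (['l','t',';'] : List Char).length
              ('l'::'t'::';'::(rep '&' ['g','t',';'] '>' m)) = rep '&' ['g','t',';'] '>' m from rfl]
          rw [rep_step_no '&' ['a','m','p',';'] '&' '<' _ (by simp [List.isPrefixOf])]
          rw [dec1_lt, ih m hm]
        · by_cases h3 : (c :: t).take 5 = "&amp;".toList
          · obtain ⟨m, hm, hl⟩ : ∃ m, m.length ≤ n ∧ c :: t = '&'::'a'::'m'::'p'::';'::m := by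
              refine ⟨(c :: t).drop 5, by simp only [List.length_drop, List.length_cons] at *; omega, ?_⟩
              conv_lhs => rw [← List.take_append_drop 5 (c :: t)]
              rw [h3]; rfl
            rw [hl]
            rw [rep_step_no '&' ['g','t',';'] '>' '&' ('a'::'m'::'p'::';'::m) (by simp [List.isPrefixOf])]
            rw [rep_step_no '&' ['g','t',';'] '>' 'a' ('m'::'p'::';'::m) (by simp [List.isPrefixOf])]
            rw [rep_step_no '&' ['g','t',';'] '>' 'm' ('p'::';'::m) (by simp [List.isPrefixOf])]
            rw [rep_step_no '&' ['g','t',';'] '>' 'p' (';'::m) (by simp [List.isPrefixOf])]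
            rw [rep_step_no '&' ['g','t',';'] '>' ';' m (by simp [List.isPrefixOf])]
            rw [rep_step_no '&' ['l','t',';'] '<' '&'
              ('a'::'m'::'p'::';'::(rep '&' ['g','t',';'] '>' m)) (by simp [List.isPrefixOf])]
            rw [rep_step_no '&' ['l','t',';'] '<' 'a' _ (by simp [List.isPrefixOf])]
            rw [rep_step_no '&' ['l','t',';'] '<' 'm' _ (by simp [List.isPrefixOf])]
            rw [rep_step_no '&' ['l','t',';'] '<' 'p' _ (by simp [List.isPrefixOf])]
            rw [rep_step_no '&' ['l','t',';'] '<' ';' _ (by simp [List.isPrefixOf])]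
            rw [rep_step_yes '&' ['a','m','p',';'] '&' '&' _ (by simp [List.isPrefixOf])]
            rw [show List.drop (['a','m','p',';'] : List Char).length
                ('a'::'m'::'p'::';'::(rep '&' ['l','t',';'] '<' (rep '&' ['g','t',';'] '>' m)))
                = rep '&' ['l','t',';'] '<' (rep '&' ['g','t',';'] '>' m) from rfl]
            rw [dec1_amp, ih m hm]
          · by_cases hc : c = '&'
            · subst hc
              have hm : t.length ≤ n := by
                simp only [List.length_cons] at h; omega
              have hng : ¬ ((['&','g','t',';'] : List Char).isPrefixOf ('&' :: t) = true) := by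
                intro hp
                exact h1 (by rw [hgt_toList, (List.prefix_iff_eq_take.mp ((List.isPrefixOf_iff_prefix).mp hp))]; rfl)
              rw [rep_step_no '&' ['g','t',';'] '>' '&' t hng]
              have hnl : ¬ ((['&','l','t',';'] : List Char).isPrefixOf
                  ('&' :: rep '&' ['g','t',';'] '>' t) = true) := by
                intro hp
                have hw : (['l','t',';'] : List Char) <+: rep '&' ['g','t',';'] '>' t :=
                  (List.cons_prefix_cons.mp ((List.isPrefixOf_iff_prefix).mp hp)).2
                have hwt : (['l','t',';'] : List Char) <+: t :=
                  rep_prefix _ _ _ _ _ (by decide) hw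
                exact h2 (by rw [hlt_toList, show (4 : Nat) = (['l','t',';'] : List Char).length + 1 from rfl,
                  List.take_succ_cons, ← List.prefix_iff_eq_take.mp hwt])
              rw [rep_step_no '&' ['l','t',';'] '<' '&' _ hnl]
              have hna : ¬ ((['&','a','m','p',';'] : List Char).isPrefixOf
                  ('&' :: rep '&' ['l','t',';'] '<' (rep '&' ['g','t',';'] '>' t)) = true) := by
                intro hp
                have hw : (['a','m','p',';'] : List Char) <+:
                    rep '&' ['l','t',';'] '<' (rep '&' ['g','t',';'] '>' t) :=
                  (List.cons_prefix_cons.mp ((List.isPrefixOf_iff_prefix).mp hp)).2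
                have hwt : (['a','m','p',';'] : List Char) <+: t :=
                  rep_prefix _ _ _ _ _ (by decide) (rep_prefix _ _ _ _ _ (by decide) hw)
                exact h3 (by rw [hamp_toList, show (5 : Nat) = (['a','m','p',';'] : List Char).length + 1 from rfl,
                  List.take_succ_cons, ← List.prefix_iff_eq_take.mp hwt])
              rw [rep_step_no '&' ['a','m','p',';'] '&' '&' _ hna]
              rw [dec1_amb t h1 h2 h3, ih t hm]
            · have hm : t.length ≤ n := by
                simp only [List.length_cons] at h; omega
              rw [rep_step_no '&' ['g','t',';'] '>' c t
                (by simp [List.isPrefixOf, (Ne.symm hc : '&' ≠ c)])]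
              rw [rep_step_no '&' ['l','t',';'] '<' c _
                (by simp [List.isPrefixOf, (Ne.symm hc : '&' ≠ c)])]
              rw [rep_step_no '&' ['a','m','p',';'] '&' c _
                (by simp [List.isPrefixOf, (Ne.symm hc : '&' ≠ c)])]
              rw [dec1_ch c t hc, ih t hm]

lemma decodeB_eq_dec1 (s : List Char) : qqDecodeB s = dec1 s := by
  unfold qqDecodeB
  rw [show "&gt;".toList = '&' :: ['g','t',';'] from rfl,
      show "&lt;".toList = '&' :: ['l','t',';'] from rfl,
      show "&amp;".toList = '&' :: ['a','m','p',';'] from rfl,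
      show ">".toList = ['>'] from rfl, show "<".toList = ['<'] from rfl,
      show "&".toList = ['&'] from rfl]
  rw [replace_eq_rep, replace_eq_rep, replace_eq_rep]
  exact dec_eq_aux s.length s le_rfl

lemma dec1_eq_nil_iff (l : List Char) : dec1 l = [] ↔ l = [] := by
  cases l with
  | nil => simp [dec1]
  | cons c t =>
    rw [dec1]
    split_ifs <;> simp

-- A's stat-0 scan of a suffix containing no '<' is: decode it, flush as text iff nonempty
lemma qqA_zero_no_lt : ∀ (n : Nat) (l : List Char), l.length ≤ n → '<' ∉ l →
    ∀ (text : List Char) (acc : List (List (String × String))),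
      qqA l 0 text acc = if text ++ dec1 l = [] then acc else acc ++ [tseg (text ++ dec1 l)] := by
  intro n
  induction n with
  | zero =>
    intro l h _ text acc
    have : l = [] := by cases l <;> simp_all
    subst this
    rw [qqA, dec1]
    by_cases ht : text = [] <;> simp [ht, tseg]
  | succ n ih =>
    intro l h hmem text acc
    cases l with
    | nil => rw [qqA, dec1]; by_cases ht : text = [] <;> simp [ht, tseg]
    | cons c t =>
      have hc : ¬ c = '<' := fun h' => hmem (h' ▸ List.mem_cons_self)
      have hmt : '<' ∉ t := fun h' => hmem (List.mem_cons_of_mem c h')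
      have hlen : t.length ≤ n := by simp only [List.length_cons] at h; omega
      have hlen4 : ((c :: t).drop 4).length ≤ n := by
        simp only [List.length_drop, List.length_cons] at *; omega
      have hlen5 : ((c :: t).drop 5).length ≤ n := by
        simp only [List.length_drop, List.length_cons] at *; omega
      have hm4 : '<' ∉ (c :: t).drop 4 := fun h' => hmem (List.drop_subset 4 (c :: t) h')
      have hm5 : '<' ∉ (c :: t).drop 5 := fun h' => hmem (List.drop_subset 5 (c :: t) h')
      have hne : ¬ (text ++ dec1 (c :: t) = []) := by
        simp [dec1_eq_nil_iff]
      rw [qqA, if_neg hne, dec1]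
      simp only [reduceIte, hc, if_false]
      split_ifs with hamp h1 h2 h3 <;>
        first
        | (rw [ih _ hlen4 hm4]; simp [List.append_assoc])
        | (rw [ih _ hlen5 hm5]; simp [List.append_assoc])
        | (rw [ih _ hlen hmt]; simp [List.append_assoc])

-- an entity window never crosses the first '<'
lemma no_cross (pre post w : List Char) (k : Nat) (hk : w.length = k)
    (hmem : '<' ∉ pre) (hw : '<' ∉ w) (h : (pre ++ '<' :: post).take k = w) :
    pre.take k = w ∧ (pre ++ '<' :: post).drop k = pre.drop k ++ '<' :: post := by
  subst hk
  have hlen : w.length ≤ pre.length := by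
    by_contra hlt
    have hlt' : pre.length < w.length := Nat.lt_of_not_le hlt
    have hget : (pre ++ '<' :: post)[pre.length]'(by simp) = '<' := by
      rw [List.getElem_append_right le_rfl]
      simp
    have h2 : ((pre ++ '<' :: post).take w.length)[pre.length]'(by simp; omega) = '<' := by
      rw [List.getElem_take]; exact hget
    have hmem2 : ((pre ++ '<' :: post).take w.length)[pre.length]'(by simp; omega) ∈
        (pre ++ '<' :: post).take w.length := List.getElem_mem _
    rw [h2, h] at hmem2
    exact hw hmem2
  refine ⟨?_, List.drop_append_of_le_length hlen⟩
  rw [← List.take_append_of_le_length hlen (l₂ := '<' :: post), h]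

lemma take_front (pre post w : List Char) (k : Nat) (hk : w.length = k)
    (h : pre.take k = w) : (pre ++ post).take k = w := by
  subst hk
  have hl : w.length ≤ pre.length := by
    have := congrArg List.length h
    simp at this
    omega
  rw [List.take_append_of_le_length hl, h]

-- A's stat-0 scan up to the first '<': decode the prefix, flush it, switch to stat 1
lemma qqA_zero_lt : ∀ (n : Nat) (pre : List Char), pre.length ≤ n → '<' ∉ pre →
    ∀ (post text : List Char) (acc : List (List (String × String))),
      qqA (pre ++ '<' :: post) 0 text acc = qqA post 1 ['<'] (acc ++ [tseg (text ++ dec1 pre)]) := by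
  intro n
  induction n with
  | zero =>
    intro pre h hp post text acc
    have : pre = [] := by cases pre <;> simp_all
    subst this
    simp only [List.nil_append]
    rw [qqA]
    simp [dec1, tseg]
  | succ n ih =>
    intro pre h hmem post text acc
    cases pre with
    | nil =>
      simp only [List.nil_append]
      rw [qqA]
      simp [dec1, tseg]
    | cons c p =>
      have hc : ¬ c = '<' := fun h' => hmem (h' ▸ List.mem_cons_self)
      have hmt : '<' ∉ p := fun h' => hmem (List.mem_cons_of_mem c h')
      have hlen : p.length ≤ n := by simp only [List.length_cons] at h; omega
      rw [List.cons_append, qqA]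
      simp only [reduceIte, hc, if_false]
      by_cases hamp : c = '&'
      · subst hamp
        simp only [if_true, reduceIte]
        rw [show '&' :: (p ++ '<' :: post) = ('&' :: p) ++ '<' :: post from rfl]
        by_cases h1 : ('&' :: p).take 4 = "&gt;".toList
        · obtain ⟨_, hdrop⟩ := no_cross ('&' :: p) post "&gt;".toList 4 rfl hmem (by decide) (take_front _ _ _ 4 rfl h1)
          rw [if_pos (take_front ('&' :: p) ('<' :: post) "&gt;".toList 4 rfl h1)]
          rw [hdrop]
          have hl4 : (('&' :: p).drop 4).length ≤ n := by
            simp only [List.length_drop, List.length_cons] at *; omega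
          have hm4 : '<' ∉ ('&' :: p).drop 4 := fun h' => hmem (List.drop_subset 4 _ h')
          rw [ih _ hl4 hm4]
          rw [dec1_gt' _ h1]
          simp [List.append_assoc]
        · rw [if_neg (fun hf => h1 (no_cross ('&' :: p) post "&gt;".toList 4 rfl hmem (by decide) hf).1)]
          by_cases h2 : ('&' :: p).take 4 = "&lt;".toList
          · obtain ⟨_, hdrop⟩ := no_cross ('&' :: p) post "&lt;".toList 4 rfl hmem (by decide) (take_front _ _ _ 4 rfl h2)
            rw [if_pos (take_front ('&' :: p) ('<' :: post) "&lt;".toList 4 rfl h2)]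
            rw [hdrop]
            have hl4 : (('&' :: p).drop 4).length ≤ n := by
              simp only [List.length_drop, List.length_cons] at *; omega
            have hm4 : '<' ∉ ('&' :: p).drop 4 := fun h' => hmem (List.drop_subset 4 _ h')
            rw [ih _ hl4 hm4]
            rw [dec1_lt' _ h2]
            simp [List.append_assoc]
          · rw [if_neg (fun hf => h2 (no_cross ('&' :: p) post "&lt;".toList 4 rfl hmem (by decide) hf).1)]
            by_cases h3 : ('&' :: p).take 5 = "&amp;".toList
            · obtain ⟨_, hdrop⟩ := no_cross ('&' :: p) post "&amp;".toList 5 rfl hmem (by decide) (take_front _ _ _ 5 rfl h3)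
              rw [if_pos (take_front ('&' :: p) ('<' :: post) "&amp;".toList 5 rfl h3)]
              rw [hdrop]
              have hl5 : (('&' :: p).drop 5).length ≤ n := by
                simp only [List.length_drop, List.length_cons] at *; omega
              have hm5 : '<' ∉ ('&' :: p).drop 5 := fun h' => hmem (List.drop_subset 5 _ h')
              rw [ih _ hl5 hm5]
              rw [dec1_amp' _ h3]
              simp [List.append_assoc]
            · rw [if_neg (fun hf => h3 (no_cross ('&' :: p) post "&amp;".toList 5 rfl hmem (by decide) hf).1)]
              rw [ih _ hlen hmt]
              rw [dec1_amb p h1 h2 h3]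
              simp [List.append_assoc]
      · simp only [hamp, if_false, Bool.false_eq_true, reduceIte]
        rw [ih _ hlen hmt]
        rw [dec1_ch c p hamp]
        simp [List.append_assoc]

-- A's stat-1 scan with no closing '>': flush text ++ rest raw as a text segment
lemma qqA_one_no_gt : ∀ (l : List Char), '>' ∉ l →
    ∀ (text : List Char), text ≠ [] → ∀ (acc : List (List (String × String))),
      qqA l 1 text acc = acc ++ [tseg (text ++ l)] := by
  intro l
  induction l with
  | nil =>
    intro _ text ht acc
    rw [qqA]
    simp [ht, tseg]
  | cons c t ih =>
    intro hmem text ht acc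
    have hc : ¬ c = '>' := fun h' => hmem (h' ▸ List.mem_cons_self)
    have hmt : '>' ∉ t := fun h' => hmem (List.mem_cons_of_mem c h')
    rw [qqA]
    simp only [hc, if_false, Nat.one_ne_zero]
    rw [ih hmt (text ++ [c]) (by simp) acc]
    simp [List.append_assoc]

-- A's stat-1 scan up to the first '>': flush the raw tag as embbed, back to stat 0
lemma qqA_one_gt : ∀ (pre : List Char), '>' ∉ pre →
    ∀ (post text : List Char) (acc : List (List (String × String))),
      qqA (pre ++ '>' :: post) 1 text acc = qqA post 0 [] (acc ++ [eseg (text ++ pre ++ ['>'])]) := by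
  intro pre
  induction pre with
  | nil =>
    intro _ post text acc
    simp only [List.nil_append]
    rw [qqA]
    simp [eseg]
  | cons c p ih =>
    intro hmem post text acc
    have hc : ¬ c = '>' := fun h' => hmem (h' ▸ List.mem_cons_self)
    have hmt : '>' ∉ p := fun h' => hmem (List.mem_cons_of_mem c h')
    rw [List.cons_append, qqA]
    simp only [hc, if_false, Nat.one_ne_zero]
    rw [ih hmt post (text ++ [c]) acc]
    simp [List.append_assoc]

lemma find_neg_not_mem (l : List Char) (ch : Char) (h : PySem.Chars.find l [ch] < 0) : ch ∉ l := by
  intro hm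
  have : ([ch] : List Char) <:+: l := by
    obtain ⟨s1, t1, rfl⟩ := List.append_of_mem hm
    exact ⟨s1, t1, by simp⟩
  have := (PySem.Chars.find_nonneg_iff l [ch]).mpr this
  omega

lemma find_nonneg_decomp (l : List Char) (ch : Char) (h : 0 ≤ PySem.Chars.find l [ch]) :
    l = l.take (PySem.Chars.find l [ch]).toNat ++ ch :: l.drop ((PySem.Chars.find l [ch]).toNat + 1) ∧
      ch ∉ l.take (PySem.Chars.find l [ch]).toNat ∧
      (PySem.Chars.find l [ch]).toNat < l.length := by
  obtain ⟨hpre, hmin⟩ := PySem.Chars.find_spec (s := l) (sub := [ch]) h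
  set k := (PySem.Chars.find l [ch]).toNat with hk
  have hkl : k < l.length := by
    have h1 := PySem.Chars.find_le_length l [ch]
    rcases Nat.lt_or_ge k l.length with h' | h'
    · exact h'
    · exfalso
      have : l.drop k = [] := List.drop_eq_nil_of_le h'
      rw [this] at hpre
      simp at hpre
  have hdk : l.drop k = ch :: l.drop (k + 1) := by
    obtain ⟨t1, ht1⟩ := hpre
    simp only [List.singleton_append] at ht1
    rw [List.drop_eq_getElem_cons hkl] at ht1 ⊢
    injection ht1 with ha hb
    rw [← ha]
  refine ⟨?_, ?_, hkl⟩
  · conv_lhs => rw [← List.take_append_drop k l]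
    rw [hdk]
  · intro hmem
    obtain ⟨i, hi, hget⟩ := List.mem_take_iff_getElem.mp hmem
    have hlt : i < k := by omega
    have : ([ch] : List Char) <+: l.drop i := by
      rw [List.drop_eq_getElem_cons (by omega)]
      refine ⟨l.drop (i + 1), ?_⟩
      simp [hget]
    exact hmin i hlt this

lemma main_eq : ∀ (n : Nat) (l : List Char), l.length ≤ n →
    ∀ (acc : List (List (String × String))), qqA l 0 [] acc = qqB l acc := by
  intro n
  induction n with
  | zero =>
    intro l h acc
    have : l = [] := by cases l <;> simp_all
    subst this
    rw [qqA, qqB]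
    simp [show PySem.Chars.find ([] : List Char) ['<'] = -1 from by decide]
  | succ n ih =>
    intro l h acc
    rw [qqB]
    by_cases hlt : PySem.Chars.find l ['<'] < 0
    · have hnm := find_neg_not_mem l '<' hlt
      rw [qqA_zero_no_lt (n + 1) l h hnm [] acc]
      simp only [dif_pos hlt]
      rw [decodeB_eq_dec1]
      by_cases hl0 : l = []
      · subst hl0; simp [dec1]
      · simp [hl0, dec1_eq_nil_iff, tseg]
    · obtain ⟨hsplit, hnm, hkl⟩ := find_nonneg_decomp l '<' (by omega)
      simp only [dif_neg hlt]
      set k := (PySem.Chars.find l ['<']).toNat with hkdef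
      have hlenk : (l.take k).length ≤ n + 1 := by simp; omega
      conv_lhs => rw [hsplit]
      rw [qqA_zero_lt (n + 1) _ hlenk hnm _ [] acc]
      rw [decodeB_eq_dec1]
      have hrest : l.drop k = '<' :: l.drop (k + 1) := by
        conv_lhs => rw [hsplit]
        rw [List.drop_append_of_le_length (by simp; omega)]
        simp
      by_cases hgt : PySem.Chars.find (l.drop k) ['>'] < 0
      · simp only [if_pos hgt]
        have hnm2 : '>' ∉ l.drop (k + 1) := by
          intro hm
          exact (find_neg_not_mem _ '>' hgt) (by rw [hrest]; exact List.mem_cons_of_mem _ hm)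
        rw [qqA_one_no_gt (l.drop (k + 1)) hnm2 ['<'] (by simp) _]
        rw [hrest]
        simp [tseg, List.nil_append]
      · simp only [if_neg hgt]
        obtain ⟨hsplit2, hnm2, hkl2⟩ := find_nonneg_decomp (l.drop k) '>' (by omega)
        set g := (PySem.Chars.find (l.drop k) ['>']).toNat with hgdef
        set rjoin := (l.drop k).drop (g + 1) with hrj
        have hpre2 : ∃ p2, (l.drop k).take g = '<' :: p2 := by
          cases hp : (l.drop k).take g with
          | nil =>
            exfalso
            rw [hp, List.nil_append, hrest] at hsplit2
            simp at hsplit2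
          | cons x p2 =>
            refine ⟨p2, ?_⟩
            have hx : x = '<' := by
              have h1 : ((l.drop k).take g ++ '>' :: rjoin) = l.drop k := hsplit2.symm
              rw [hp, hrest] at h1
              simp at h1
              exact h1.1
            rw [hx]
        obtain ⟨p2, hp2⟩ := hpre2
        have hdk1 : l.drop (k + 1) = p2 ++ '>' :: rjoin := by
          have h1 : l.drop k = ('<' :: p2) ++ '>' :: rjoin := by
            conv_lhs => rw [hsplit2]
            rw [hp2]
          rw [hrest] at h1
          simp only [List.cons_append, List.cons.injEq, true_and] at h1
          exact h1
        have hnm3 : '>' ∉ p2 := fun hm => hnm2 (hp2 ▸ List.mem_cons_of_mem _ hm)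
        rw [hdk1, qqA_one_gt p2 hnm3 _ ['<'] _]
        have hlp : ((l.drop k).take g).length = g := by
          rw [List.length_take]
          exact Nat.min_eq_left (le_of_lt hkl2)
        have hl2 : ('<' :: p2).length = g := by rw [← hp2]; exact hlp
        have htake : (l.drop k).take (g + 1) = ('<' :: p2) ++ ['>'] := by
          conv_lhs => rw [hsplit2]
          rw [List.take_append, hp2]
          rw [List.take_of_length_le (by omega), hl2]
          simp
        rw [htake]
        have hlen2 : rjoin.length ≤ n := by
          rw [hrj]
          simp only [List.length_drop] at *
          omega
        rw [ih _ hlen2]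
        simp [tseg, eseg]

-- ===== VERDICT (by name: the statement is the Claim_ definition above) =====
theorem qqmsg_to_arr_py_spec : Claim_equal_qqmsg_to_arr_py := by
  intro cqstr _
  unfold Spec_qqmsg_to_arr_py qqmsg_to_arr_py qqmsg_to_arr_py_alt
  exact main_eq cqstr.toList.length cqstr.toList le_rfl []
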